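-- pv_equiv track=rewrite | github.com/lscherub/Shopify-Product-Exporter | exporter.py | filter_duplicates_and_no_images
-- ===== SOURCE A (Python) =====
-- def filter_duplicates_and_no_images(rows):
--     """
--     Filters rows to show DUPLICATE GROUPS where AT LEAST ONE member has No Image.
--     This preserves the context (the duplicate pair) even if one has an image.
--     """
--     from collections import defaultdict
--
--     # 1. Group by SKU and Barcode
--     # A row can belong to multiple groups (if it has both SKU and Barcode),
--     # but simplest approach is to group by a primary key or check both.
--     # Let's map unique_key -> [rows].
--     # Since SKU and Barcode are independent, let's treat them as separate groups.
--     # To avoid duplication in output if a row is in multiple groups, we'll collect all valid rows in a set.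
--
--     sku_groups = defaultdict(list)
--     barcode_groups = defaultdict(list)
--
--     for row in rows:
--         sku = str(row.get('SKU', '')).strip()
--         barcode = str(row.get('Barcode', '')).strip()
--
--         if sku:
--             sku_groups[sku].append(row)
--         if barcode:
--             barcode_groups[barcode].append(row)
--
--     # 2. Identify Valid Groups
--     # Valid Group: Size > 1 AND Any(row has no image)
--
--     kept_rows_ids = set()
--
--     def check_groups(groups):
--         for key, group in groups.items():
--             if len(group) < 2:
--                 continue
--
--             has_no_image = False
--             for r in group:
--                 try:
--                     cnt = int(r.get('Image Count', 0))
--                 except: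
--                     cnt = 0
--                 if cnt == 0:
--                     has_no_image = True
--                     break
--
--             if has_no_image:
--                 for r in group:
--                     kept_rows_ids.add(id(r))
--
--     check_groups(sku_groups)
--     check_groups(barcode_groups)
--
--     # 3. Reconstruct list preserving order
--     result = []
--     for row in rows:
--         if id(row) in kept_rows_ids:
--             result.append(row)
--
--     return result
-- ===== SOURCE B (Python) =====
-- def filter_duplicates_and_no_images(rows):
--     """
--     Single-pass aggregation: instead of storing group member lists and an
--     id()-set of kept rows, tally per key only (count, any-member-has-no-image)
--     and keep a row when one of its keys belongs to a valid key set.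
--     """
--     def no_image(row):
--         try:
--             return int(row.get('Image Count', 0)) == 0
--         except:
--             return True
--
--     def valid_keys(field):
--         stats = {}
--         for row in rows:
--             k = str(row.get(field, '')).strip()
--             if k:
--                 c, f = stats.get(k, (0, False))
--                 stats[k] = (c + 1, f or no_image(row))
--         return {k for k, (c, f) in stats.items() if c >= 2 and f}
--
--     valid_sku = valid_keys('SKU')
--     valid_barcode = valid_keys('Barcode')
--
--     return [row for row in rows
--             if str(row.get('SKU', '')).strip() in valid_sku
--             or str(row.get('Barcode', '')).strip() in valid_barcode]
-- ===== Notes on version B (the rewrite author's own statement) =====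
-- stated objective: alternative
-- what changed: Replace the stored group member lists and the id()-based kept-row set by a one-pass per-key aggregation of (count, any-no-image) and two valid-key sets; the output pass keeps a row by re-deriving its keys, so group lists and row identities are never materialised.
import Mathlib
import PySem

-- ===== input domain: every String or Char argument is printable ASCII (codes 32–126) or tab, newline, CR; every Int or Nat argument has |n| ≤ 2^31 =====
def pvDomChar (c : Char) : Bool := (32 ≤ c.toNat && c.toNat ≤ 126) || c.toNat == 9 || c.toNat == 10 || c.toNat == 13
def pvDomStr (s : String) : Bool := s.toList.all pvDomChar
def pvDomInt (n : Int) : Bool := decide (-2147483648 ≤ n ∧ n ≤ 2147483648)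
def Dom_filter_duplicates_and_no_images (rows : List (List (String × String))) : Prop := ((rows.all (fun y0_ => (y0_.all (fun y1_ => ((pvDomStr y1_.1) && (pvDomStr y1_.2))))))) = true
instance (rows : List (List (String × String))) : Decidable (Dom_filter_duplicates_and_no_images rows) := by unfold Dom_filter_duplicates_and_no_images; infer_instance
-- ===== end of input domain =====

-- B replaces A's stored group member lists and id()-based kept-row set by a per-key (count, any-no-image)
-- aggregation and two valid-key sets (objective: alternative, same asymptotic cost).
-- A's id(r) identity set is ported at value level (rows are values here), which is exact for rows that are
-- distinct objects, and agrees with Python also for equal-valued rows since equal rows carry equal keys.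

-- ===== PORT A =====
-- str(row.get(name, '')).strip() — str() on a str is the identity
def pvKeyOfA (row : List (String × String)) (name : String) : String :=
  PySem.Str.strip (((PySem.Dict.mk row).get? name).getD "")

-- try: cnt = int(r.get('Image Count', 0)) except: cnt = 0  (a missing key yields the int 0 directly)
def pvCntA (row : List (String × String)) : Int :=
  match (PySem.Dict.mk row).get? "Image Count" with
  | none => 0
  | some s => (PySem.Int.ofStr? s).getD 0

-- the inner 'for r in group: … break' loop computing has_no_image
def pvHasNoImageA : List (List (String × String)) → Bool
  | [] => false
  | r :: rs => if pvCntA r = 0 then true else pvHasNoImageA rs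

-- def check_groups(groups): skip groups of size < 2, add every member of a qualifying group to the kept set
def pvCheckGroupsA (kept : PySem.Set (List (String × String)))
    (g : PySem.Dict String (List (List (String × String)))) : PySem.Set (List (String × String)) :=
  g.items.foldl (fun kept kg =>
    if kg.2.length < 2 then kept
    else if pvHasNoImageA kg.2 then PySem.Set.update kept kg.2 else kept) kept

def filter_duplicates_and_no_images (rows : List (List (String × String))) : List (List (String × String)) :=
  -- 1. group by SKU and Barcode (defaultdict(list) appends)
  let gs := rows.foldl
    (fun (g : PySem.Dict String (List (List (String × String))) ×
              PySem.Dict String (List (List (String × String)))) row =>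
      ((if pvKeyOfA row "SKU" ≠ "" then g.1.modify (pvKeyOfA row "SKU") [] (· ++ [row]) else g.1),
       (if pvKeyOfA row "Barcode" ≠ "" then g.2.modify (pvKeyOfA row "Barcode") [] (· ++ [row]) else g.2)))
    (PySem.Dict.empty, PySem.Dict.empty)
  -- 2. identify valid groups
  let kept := pvCheckGroupsA (pvCheckGroupsA PySem.Set.empty gs.1) gs.2
  -- 3. reconstruct list preserving order
  rows.foldl (fun result row => if kept.contains row then result ++ [row] else result) []

-- ===== PORT B =====
def pvKeyOfB (row : List (String × String)) (name : String) : String :=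
  PySem.Str.strip (((PySem.Dict.mk row).get? name).getD "")

-- def no_image(row): int(row.get('Image Count', 0)) == 0, except → True
def pvNoImageB (row : List (String × String)) : Bool :=
  match (PySem.Dict.mk row).get? "Image Count" with
  | none => true
  | some s => (PySem.Int.ofStr? s).getD 0 == 0

-- the stats loop of valid_keys: per key, (count, any member has no image)
def pvStatFoldB (rows : List (List (String × String))) (field : String) :
    PySem.Dict String (Int × Bool) :=
  rows.foldl (fun st row =>
    let k := pvKeyOfB row field
    if k ≠ "" then
      let p := st.getD k (0, false)
      st.insert k (p.1 + 1, p.2 || pvNoImageB row)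
    else st) PySem.Dict.empty

-- {k for k, (c, f) in stats.items() if c >= 2 and f}
def pvValidKeysB (rows : List (List (String × String))) (field : String) : PySem.Set String :=
  PySem.Set.ofList (((pvStatFoldB rows field).items.filter
    (fun kv => decide (2 ≤ kv.2.1) && kv.2.2)).map (·.1))

def filter_duplicates_and_no_images_alt (rows : List (List (String × String))) : List (List (String × String)) :=
  let validSku := pvValidKeysB rows "SKU"
  let validBarcode := pvValidKeysB rows "Barcode"
  rows.filter (fun row =>
    validSku.contains (pvKeyOfB row "SKU") || validBarcode.contains (pvKeyOfB row "Barcode"))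

-- ===== PRECONDITION & SPEC =====
def Spec_filter_duplicates_and_no_images (rows : List (List (String × String))) (out : List (List (String × String))) : Prop := out = filter_duplicates_and_no_images_alt rows
instance (rows : List (List (String × String))) (out : List (List (String × String))) : Decidable (Spec_filter_duplicates_and_no_images rows out) := by unfold Spec_filter_duplicates_and_no_images; infer_instance

-- ===== CLAIM (what is proved, stated in full; the proofs are below) =====
def Claim_equal_filter_duplicates_and_no_images : Prop := ∀ (rows : List (List (String × String))), Dom_filter_duplicates_and_no_images rows → Spec_filter_duplicates_and_no_images rows (filter_duplicates_and_no_images rows)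

-- ===== LEMMAS AND PROOFS =====

-- B's key helper is A's
theorem pvKeyOfB_eq : pvKeyOfB = pvKeyOfA := rfl

-- B's no_image is A's "parsed count = 0"
theorem pvNoImageB_eq (r : List (String × String)) :
    pvNoImageB r = decide (pvCntA r = 0) := by
  unfold pvNoImageB pvCntA
  cases h : (PySem.Dict.mk r).get? "Image Count" with
  | none => simp
  | some s => by_cases h0 : (PySem.Int.ofStr? s).getD 0 = 0 <;> simp [h0]

-- the break-loop is List.any
theorem pvHasNoImageA_eq_any (l : List (List (String × String))) :
    pvHasNoImageA l = l.any (fun r => decide (pvCntA r = 0)) := by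
  induction l with
  | nil => rfl
  | cons r rs ih => by_cases h : pvCntA r = 0 <;> simp [pvHasNoImageA, h, ih]

-- the A-side grouping fold, parameterised by the field and a starting dict
def pvGrpFold (name : String) (d : PySem.Dict String (List (List (String × String))))
    (rows : List (List (String × String))) : PySem.Dict String (List (List (String × String))) :=
  rows.foldl (fun d row =>
    if pvKeyOfA row name ≠ "" then d.modify (pvKeyOfA row name) [] (· ++ [row]) else d) d

theorem pvGrpFold_getD (name c : String) (hc : c ≠ "")
    (rows : List (List (String × String))) :
    ∀ d, (pvGrpFold name d rows).getD c [] =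
      d.getD c [] ++ rows.filter (fun r => pvKeyOfA r name == c) := by
  induction rows with
  | nil => intro d; simp [pvGrpFold]
  | cons r rs ih =>
    intro d
    show (pvGrpFold name (if pvKeyOfA r name ≠ "" then d.modify (pvKeyOfA r name) [] (· ++ [r]) else d) rs).getD c [] = _
    by_cases hk : pvKeyOfA r name = ""
    · simp [hk, ih, hc]
    · rw [if_pos hk, ih]
      by_cases hkc : pvKeyOfA r name = c
      · simp [hkc, List.append_assoc]
      · have hcc : ¬ (c = pvKeyOfA r name) := fun h => hkc h.symm
        simp [hkc, PySem.Dict.getD_modify, hcc]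

theorem pvGrpFold_keys_mem (name c : String) (rows : List (List (String × String))) :
    ∀ d, c ∈ (pvGrpFold name d rows).keys ↔
      c ∈ d.keys ∨ ∃ r ∈ rows, pvKeyOfA r name = c ∧ c ≠ "" := by
  induction rows with
  | nil => intro d; simp [pvGrpFold]
  | cons r rs ih =>
    intro d
    show c ∈ (pvGrpFold name (if pvKeyOfA r name ≠ "" then d.modify (pvKeyOfA r name) [] (· ++ [r]) else d) rs).keys ↔ _
    by_cases hk : pvKeyOfA r name = ""
    · rw [if_neg (by simp [hk])]
      rw [ih]
      constructor
      · rintro (h | ⟨x, hx, hxk, hcne⟩)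
        · exact Or.inl h
        · exact Or.inr ⟨x, List.mem_cons_of_mem _ hx, hxk, hcne⟩
      · rintro (h | ⟨x, hx, hxk, hcne⟩)
        · exact Or.inl h
        · rcases List.mem_cons.mp hx with rfl | hx'
          · exact absurd (hxk ▸ hk) hcne
          · exact Or.inr ⟨x, hx', hxk, hcne⟩
    · rw [if_pos hk, ih, PySem.Dict.keys_modify, PySem.Dict.mem_keys_insert]
      constructor
      · rintro ((rfl | h) | ⟨x, hx, hxk, hcne⟩)
        · exact Or.inr ⟨r, List.mem_cons_self, rfl, hk⟩
        · exact Or.inl h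
        · exact Or.inr ⟨x, List.mem_cons_of_mem _ hx, hxk, hcne⟩
      · rintro (h | ⟨x, hx, hxk, hcne⟩)
        · exact Or.inl (Or.inr h)
        · rcases List.mem_cons.mp hx with rfl | hx'
          · exact Or.inl (Or.inl hxk.symm)
          · exact Or.inr ⟨x, hx', hxk, hcne⟩

theorem pvGrpFold_keys_nodup (name : String) (rows : List (List (String × String))) :
    ∀ d : PySem.Dict String (List (List (String × String))),
      d.keys.Nodup → (pvGrpFold name d rows).keys.Nodup := by
  induction rows with
  | nil => intro d hd; simpa [pvGrpFold] using hd
  | cons r rs ih =>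
    intro d hd
    show (pvGrpFold name (if pvKeyOfA r name ≠ "" then d.modify (pvKeyOfA r name) [] (· ++ [r]) else d) rs).keys.Nodup
    by_cases hk : pvKeyOfA r name = ""
    · rw [if_neg (by simp [hk])]; exact ih d hd
    · rw [if_pos hk]
      apply ih
      rw [PySem.Dict.keys_modify]
      exact PySem.Dict.nodup_keys_insert _ _ _ hd

theorem pvCheckGroupsA_mem (g : PySem.Dict String (List (List (String × String))))
    (kept : PySem.Set (List (String × String))) (r : List (String × String)) :
    r ∈ pvCheckGroupsA kept g ↔
      r ∈ kept ∨ ∃ kg ∈ g.items, 2 ≤ kg.2.length ∧ pvHasNoImageA kg.2 = true ∧ r ∈ kg.2 := by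
  show r ∈ g.items.foldl _ kept ↔ _
  induction g.items generalizing kept with
  | nil => simp
  | cons kg l ih =>
    rw [List.foldl_cons]
    split_ifs with h1 h2
    · rw [ih]
      constructor
      · rintro (h | ⟨x, hx, hrest⟩)
        · exact Or.inl h
        · exact Or.inr ⟨x, List.mem_cons_of_mem _ hx, hrest⟩
      · rintro (h | ⟨x, hx, hrest⟩)
        · exact Or.inl h
        · rcases List.mem_cons.mp hx with rfl | hx'
          · omega
          · exact Or.inr ⟨x, hx', hrest⟩
    · rw [ih]
      constructor
      · rintro (h | ⟨x, hx, hrest⟩)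
        · rcases (PySem.Set.mem_update _ _ _).mp h with h' | h'
          · exact Or.inl h'
          · exact Or.inr ⟨kg, List.mem_cons_self, by omega, h2, h'⟩
        · exact Or.inr ⟨x, List.mem_cons_of_mem _ hx, hrest⟩
      · rintro (h | ⟨x, hx, hrest⟩)
        · exact Or.inl ((PySem.Set.mem_update _ _ _).mpr (Or.inl h))
        · rcases List.mem_cons.mp hx with rfl | hx'
          · exact Or.inl ((PySem.Set.mem_update _ _ _).mpr (Or.inr hrest.2.2))
          · exact Or.inr ⟨x, hx', hrest⟩
    · rw [ih]
      constructor
      · rintro (h | ⟨x, hx, hrest⟩)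
        · exact Or.inl h
        · exact Or.inr ⟨x, List.mem_cons_of_mem _ hx, hrest⟩
      · rintro (h | ⟨x, hx, hrest⟩)
        · exact Or.inl h
        · rcases List.mem_cons.mp hx with rfl | hx'
          · exact absurd hrest.2.1 (by simpa using h2)
          · exact Or.inr ⟨x, hx', hrest⟩

-- condition under which a row r ∈ rows is kept via the field `name`
def pvCond (name : String) (rows : List (List (String × String)))
    (r : List (String × String)) : Prop :=
  pvKeyOfA r name ≠ "" ∧
    2 ≤ (rows.filter (fun x => pvKeyOfA x name == pvKeyOfA r name)).length ∧
    (rows.filter (fun x => pvKeyOfA x name == pvKeyOfA r name)).any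
      (fun x => decide (pvCntA x = 0)) = true

theorem pvSide_mem (name : String) (rows : List (List (String × String)))
    (r : List (String × String)) (hr : r ∈ rows) :
    (∃ kg ∈ (pvGrpFold name PySem.Dict.empty rows).items,
        2 ≤ kg.2.length ∧ pvHasNoImageA kg.2 = true ∧ r ∈ kg.2) ↔ pvCond name rows r := by
  have hnd := pvGrpFold_keys_nodup name rows PySem.Dict.empty (by simp)
  constructor
  · rintro ⟨⟨c, grp⟩, hmem, hlen, hni, hrin⟩
    rcases (pvGrpFold_keys_mem name c rows PySem.Dict.empty).mp
        (PySem.Dict.mem_keys_of_mem_items _ hmem) with h | ⟨x, hx, hxk, hcne⟩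
    · simp at h
    · have hgrp : grp = rows.filter (fun x => pvKeyOfA x name == c) := by
        have hg := PySem.Dict.getD_of_mem_items _ hmem hnd ([] : List (List (String × String)))
        rw [pvGrpFold_getD name c hcne rows PySem.Dict.empty] at hg
        simpa using hg.symm
      have hkr : pvKeyOfA r name = c := by
        have := (List.mem_filter.mp (hgrp ▸ hrin)).2
        simpa using this
      refine ⟨by rw [hkr]; exact hcne, ?_, ?_⟩
      · rw [hkr, ← hgrp]; exact hlen
      · rw [hkr, ← hgrp, ← pvHasNoImageA_eq_any]; exact hni
  · rintro ⟨hne, hlen, hany⟩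
    have hkeys : pvKeyOfA r name ∈ (pvGrpFold name PySem.Dict.empty rows).keys :=
      (pvGrpFold_keys_mem name (pvKeyOfA r name) rows PySem.Dict.empty).mpr
        (Or.inr ⟨r, hr, rfl, hne⟩)
    simp only [PySem.Dict.keys] at hkeys
    obtain ⟨p, hp, hp1⟩ := List.mem_map.mp hkeys
    obtain ⟨a, grp⟩ := p
    simp only at hp1
    subst hp1
    have hgrp : grp = rows.filter (fun x => pvKeyOfA x name == pvKeyOfA r name) := by
      have hg := PySem.Dict.getD_of_mem_items _ hp hnd ([] : List (List (String × String)))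
      rw [pvGrpFold_getD name _ hne rows PySem.Dict.empty] at hg
      simpa using hg.symm
    refine ⟨(pvKeyOfA r name, grp), hp, ?_, ?_, ?_⟩
    · rw [hgrp]; exact hlen
    · rw [hgrp, pvHasNoImageA_eq_any]; exact hany
    · rw [hgrp]; exact List.mem_filter.mpr ⟨hr, by simp⟩

theorem pvStatFold_getD (field c : String) (hc : c ≠ "")
    (rows : List (List (String × String))) :
    ∀ d : PySem.Dict String (Int × Bool),
      ((rows.foldl (fun st row =>
          let k := pvKeyOfB row field
          if k ≠ "" then
            let p := st.getD k (0, false)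
            st.insert k (p.1 + 1, p.2 || pvNoImageB row)
          else st) d).getD c (0, false)) =
        ((d.getD c (0, false)).1 + (rows.filter (fun x => pvKeyOfB x field == c)).length,
         (d.getD c (0, false)).2 || (rows.filter (fun x => pvKeyOfB x field == c)).any pvNoImageB) := by
  induction rows with
  | nil => intro d; simp
  | cons r rs ih =>
    intro d
    rw [List.foldl_cons]
    dsimp only
    by_cases hk : pvKeyOfB r field = ""
    · rw [if_neg (by simp [hk])]
      rw [ih]
      simp [hk, hc]
    · rw [if_pos hk, ih]
      by_cases hkc : pvKeyOfB r field = c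
      · rw [hkc, PySem.Dict.getD_insert]
        simp [hkc, Prod.ext_iff, Bool.or_assoc]
        omega
      · have hcc : ¬ (c = pvKeyOfB r field) := fun h => hkc h.symm
        rw [PySem.Dict.getD_insert, if_neg hcc]
        simp [hkc]

theorem pvStatFold_keys_mem (field c : String) (rows : List (List (String × String))) :
    c ∈ (pvStatFoldB rows field).keys ↔
      ∃ r ∈ rows, pvKeyOfB r field = c ∧ c ≠ "" := by
  have H : ∀ (rows : List (List (String × String))) (d : PySem.Dict String (Int × Bool)),
      c ∈ (rows.foldl (fun st row =>
          let k := pvKeyOfB row field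
          if k ≠ "" then
            let p := st.getD k (0, false)
            st.insert k (p.1 + 1, p.2 || pvNoImageB row)
          else st) d).keys ↔ c ∈ d.keys ∨ ∃ r ∈ rows, pvKeyOfB r field = c ∧ c ≠ "" := by
    intro rows
    induction rows with
    | nil => intro d; simp
    | cons r rs ih =>
      intro d
      rw [List.foldl_cons]
      dsimp only
      by_cases hk : pvKeyOfB r field = ""
      · rw [if_neg (by simp [hk])]
        rw [ih]
        constructor
        · rintro (h | ⟨x, hx, hxk, hcne⟩)
          · exact Or.inl h
          · exact Or.inr ⟨x, List.mem_cons_of_mem _ hx, hxk, hcne⟩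
        · rintro (h | ⟨x, hx, hxk, hcne⟩)
          · exact Or.inl h
          · rcases List.mem_cons.mp hx with rfl | hx'
            · exact absurd (hxk ▸ hk) hcne
            · exact Or.inr ⟨x, hx', hxk, hcne⟩
      · rw [if_pos hk, ih]
        constructor
        · rintro (h | ⟨x, hx, hxk, hcne⟩)
          · rcases (PySem.Dict.mem_keys_insert _ _ _ _).mp h with rfl | h'
            · exact Or.inr ⟨r, List.mem_cons_self, rfl, hk⟩
            · exact Or.inl h'
          · exact Or.inr ⟨x, List.mem_cons_of_mem _ hx, hxk, hcne⟩
        · rintro (h | ⟨x, hx, hxk, hcne⟩)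
          · exact Or.inl ((PySem.Dict.mem_keys_insert _ _ _ _).mpr (Or.inr h))
          · rcases List.mem_cons.mp hx with rfl | hx'
            · exact Or.inl ((PySem.Dict.mem_keys_insert _ _ _ _).mpr (Or.inl hxk.symm))
            · exact Or.inr ⟨x, hx', hxk, hcne⟩
  unfold pvStatFoldB
  rw [H]
  simp

theorem pvStatFold_keys_nodup (field : String) (rows : List (List (String × String))) :
    (pvStatFoldB rows field).keys.Nodup := by
  have H : ∀ (rows : List (List (String × String))) (d : PySem.Dict String (Int × Bool)),
      d.keys.Nodup → (rows.foldl (fun st row =>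
          let k := pvKeyOfB row field
          if k ≠ "" then
            let p := st.getD k (0, false)
            st.insert k (p.1 + 1, p.2 || pvNoImageB row)
          else st) d).keys.Nodup := by
    intro rows
    induction rows with
    | nil => intro d hd; simpa using hd
    | cons r rs ih =>
      intro d hd
      rw [List.foldl_cons]
      dsimp only
      by_cases hk : pvKeyOfB r field = ""
      · rw [if_neg (by simp [hk])]; exact ih d hd
      · rw [if_pos hk]
        exact ih _ (PySem.Dict.nodup_keys_insert _ _ _ hd)
  exact H rows PySem.Dict.empty (by simp)

theorem pvValidKeysB_mem (field c : String) (rows : List (List (String × String))) :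
    c ∈ pvValidKeysB rows field ↔
      (∃ r ∈ rows, pvKeyOfB r field = c) ∧ c ≠ "" ∧
        2 ≤ (rows.filter (fun x => pvKeyOfB x field == c)).length ∧
        (rows.filter (fun x => pvKeyOfB x field == c)).any pvNoImageB = true := by
  have hnd := pvStatFold_keys_nodup field rows
  constructor
  · intro h
    obtain ⟨p, hpf, hp1⟩ := List.mem_map.mp ((PySem.Set.mem_ofList _ _).mp h)
    obtain ⟨hpmem, hpred⟩ := List.mem_filter.mp hpf
    obtain ⟨a, v⟩ := p
    simp only at hp1
    subst hp1
    obtain ⟨r0, hr0, hk0, hne⟩ :=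
      (pvStatFold_keys_mem field a rows).mp (PySem.Dict.mem_keys_of_mem_items _ hpmem)
    have hv : v = (((rows.filter (fun x => pvKeyOfB x field == a)).length : Int),
        (rows.filter (fun x => pvKeyOfB x field == a)).any pvNoImageB) := by
      have hg := PySem.Dict.getD_of_mem_items _ hpmem hnd ((0 : Int), false)
      rw [show pvStatFoldB rows field =
        (rows.foldl (fun st row =>
          let k := pvKeyOfB row field
          if k ≠ "" then
            let p := st.getD k (0, false)
            st.insert k (p.1 + 1, p.2 || pvNoImageB row)
          else st) PySem.Dict.empty) from rfl,
        pvStatFold_getD field a hne rows PySem.Dict.empty] at hg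
      simpa using hg.symm
    rw [hv] at hpred
    simp only [Bool.and_eq_true, decide_eq_true_eq] at hpred
    refine ⟨⟨r0, hr0, hk0⟩, hne, ?_, hpred.2⟩
    exact_mod_cast hpred.1
  · rintro ⟨⟨r0, hr0, hk0⟩, hne, hlen, hany⟩
    have hkeys : c ∈ (pvStatFoldB rows field).keys :=
      (pvStatFold_keys_mem field c rows).mpr ⟨r0, hr0, hk0, hne⟩
    simp only [PySem.Dict.keys] at hkeys
    obtain ⟨p, hpmem, hp1⟩ := List.mem_map.mp hkeys
    obtain ⟨a, v⟩ := p
    simp only at hp1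
    subst hp1
    have hv : v = (((rows.filter (fun x => pvKeyOfB x field == a)).length : Int),
        (rows.filter (fun x => pvKeyOfB x field == a)).any pvNoImageB) := by
      have hg := PySem.Dict.getD_of_mem_items _ hpmem hnd ((0 : Int), false)
      rw [show pvStatFoldB rows field =
        (rows.foldl (fun st row =>
          let k := pvKeyOfB row field
          if k ≠ "" then
            let p := st.getD k (0, false)
            st.insert k (p.1 + 1, p.2 || pvNoImageB row)
          else st) PySem.Dict.empty) from rfl,
        pvStatFold_getD field a hne rows PySem.Dict.empty] at hg
      simpa using hg.symm
    refine (PySem.Set.mem_ofList _ _).mpr (List.mem_map.mpr ⟨(a, v), ?_, rfl⟩)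
    refine List.mem_filter.mpr ⟨hpmem, ?_⟩
    rw [hv]
    simp only [Bool.and_eq_true, decide_eq_true_eq]
    exact ⟨by exact_mod_cast hlen, hany⟩

-- ===== VERDICT (by name: the statement is the Claim_ definition above) =====
theorem pvKeptA_iff (rows : List (List (String × String))) (row : List (String × String))
    (hr : row ∈ rows) :
    ((pvCheckGroupsA (pvCheckGroupsA PySem.Set.empty (pvGrpFold "SKU" PySem.Dict.empty rows))
        (pvGrpFold "Barcode" PySem.Dict.empty rows)).contains row = true) ↔
      (pvCond "SKU" rows row ∨ pvCond "Barcode" rows row) := by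
  rw [PySem.Set.contains_iff, pvCheckGroupsA_mem, pvCheckGroupsA_mem,
    pvSide_mem "SKU" rows row hr, pvSide_mem "Barcode" rows row hr]
  have : row ∉ (PySem.Set.empty : PySem.Set (List (String × String))) := by
    simp [PySem.Set.empty]
  tauto

theorem pvKeptB_iff (name : String) (rows : List (List (String × String)))
    (row : List (String × String)) (hr : row ∈ rows) :
    ((pvValidKeysB rows name).contains (pvKeyOfB row name) = true) ↔ pvCond name rows row := by
  rw [PySem.Set.contains_iff, pvValidKeysB_mem]
  have hNo : pvNoImageB = fun x => decide (pvCntA x = 0) := funext pvNoImageB_eq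
  unfold pvCond
  rw [pvKeyOfB_eq, hNo]
  constructor
  · rintro ⟨_, h1, h2, h3⟩
    exact ⟨h1, h2, h3⟩
  · rintro ⟨h1, h2, h3⟩
    exact ⟨⟨row, hr, rfl⟩, h1, h2, h3⟩

theorem filter_duplicates_and_no_images_spec : Claim_equal_filter_duplicates_and_no_images := by
  intro rows _
  show filter_duplicates_and_no_images rows = filter_duplicates_and_no_images_alt rows
  have hsplit : ∀ (l : List (List (String × String)))
      (d1 d2 : PySem.Dict String (List (List (String × String)))),
      l.foldl (fun (g : PySem.Dict String (List (List (String × String))) ×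
              PySem.Dict String (List (List (String × String)))) row =>
        ((if pvKeyOfA row "SKU" ≠ "" then g.1.modify (pvKeyOfA row "SKU") [] (· ++ [row]) else g.1),
         (if pvKeyOfA row "Barcode" ≠ "" then g.2.modify (pvKeyOfA row "Barcode") [] (· ++ [row]) else g.2)))
        (d1, d2) = (pvGrpFold "SKU" d1 l, pvGrpFold "Barcode" d2 l) := by
    intro l
    induction l with
    | nil => intro d1 d2; rfl
    | cons r rs ih =>
      intro d1 d2
      rw [List.foldl_cons, ih]
      rfl
  unfold filter_duplicates_and_no_images filter_duplicates_and_no_images_alt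
  rw [hsplit rows PySem.Dict.empty PySem.Dict.empty]
  have hsel := PySem.List.foldl_append_if
    (fun row => (pvCheckGroupsA (pvCheckGroupsA PySem.Set.empty
        (pvGrpFold "SKU" PySem.Dict.empty rows))
        (pvGrpFold "Barcode" PySem.Dict.empty rows)).contains row)
    (fun x => x) rows []
  simp only [List.nil_append, List.map_id'] at hsel
  rw [hsel]
  apply List.filter_congr
  intro row hr
  have hA := pvKeptA_iff rows row hr
  have hB1 := pvKeptB_iff "SKU" rows row hr
  have hB2 := pvKeptB_iff "Barcode" rows row hr
  have : ((pvValidKeysB rows "SKU").contains (pvKeyOfB row "SKU") ||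
      (pvValidKeysB rows "Barcode").contains (pvKeyOfB row "Barcode")) = true ↔
      (pvCond "SKU" rows row ∨ pvCond "Barcode" rows row) := by
    rw [Bool.or_eq_true, hB1, hB2]
  exact Bool.eq_iff_iff.mpr (hA.trans this.symm)
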